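-- pv_equiv track=rewrite | github.com/j40903272/spring-webmvc-python | springframework/web/util/UrlPathHelper.py | remove_semicolon_content
-- ===== SOURCE A (Python) =====
-- def remove_semicolon_content(requestUri: str) -> str:
--     if not requestUri:
--         return ""
--     res: str = ""
--     state = False
--     for i in requestUri:
--         if i == ";":
--             state = True
--         if state == False:
--             res = res + i
--         if i == "/":
--             state = False
--     return res
-- ===== SOURCE B (Python) =====
-- def remove_semicolon_content(requestUri: str) -> str:
--     out = []
--     s = requestUri
--     while True:
--         i = s.find(';')
--         if i == -1:
--             out.append(s)
--             return ''.join(out)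
--         j = s.find('/', i)
--         if j == -1:
--             out.append(s[:i])
--             return ''.join(out)
--         out.append(s[:i])
--         s = s[j + 1:]
-- ===== Notes on version B (the rewrite author's own statement) =====
-- stated objective: faster
-- what changed: Replaces the per-character boolean state machine with a loop of str.find calls that locate each semicolon and its terminating slash, slicing out the kept segments wholesale and joining them at the end.
import Mathlib
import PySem

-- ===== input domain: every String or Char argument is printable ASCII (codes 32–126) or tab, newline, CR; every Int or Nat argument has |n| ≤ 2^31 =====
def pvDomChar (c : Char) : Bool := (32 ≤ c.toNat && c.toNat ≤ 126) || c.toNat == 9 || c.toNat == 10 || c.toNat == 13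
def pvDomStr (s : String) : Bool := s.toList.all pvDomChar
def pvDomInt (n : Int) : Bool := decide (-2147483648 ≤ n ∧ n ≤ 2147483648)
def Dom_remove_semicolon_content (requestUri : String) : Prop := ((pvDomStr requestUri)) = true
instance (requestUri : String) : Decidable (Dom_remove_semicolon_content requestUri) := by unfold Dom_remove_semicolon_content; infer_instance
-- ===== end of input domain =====

-- B replaces A's per-character boolean state machine by substring-search (str.find) and slicing
-- out whole kept segments between matches (objective: idiomatic; C-level find/slice loop).


-- ===== PORT A =====
-- one iteration of A's for-loop; the loop state is (res, state)
def pvStepA (st : List Char × Bool) (i : Char) : List Char × Bool :=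
  let state := if i = ';' then true else st.2
  let res := if state = false then st.1 ++ [i] else st.1
  let state := if i = '/' then false else state
  (res, state)

def remove_semicolon_content (requestUri : String) : String :=
  if requestUri.toList = [] then ""       -- `if not requestUri: return ""`
  else String.ofList (requestUri.toList.foldl pvStepA ([], false)).1

-- ===== PORT B =====
-- termination helper for the while-loop of Source B (each iteration moves past the found '/')
theorem pvSliceLt (s : List Char) (j : Int)
    (hi : PySem.Chars.find s [';'] ≠ -1)
    (hj : PySem.Chars.findFrom s ['/'] (PySem.Chars.find s [';']) = j) (hj1 : j ≠ -1) :
    (PySem.Chars.slice s (some (j + 1)) none).length < s.length := by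
  have hi0 : 0 ≤ PySem.Chars.find s [';'] := by
    have := PySem.Chars.neg_one_le_find s [';']; omega
  have hne : s ≠ [] := by
    intro h; subst h
    have : [';'] <+: (List.drop (PySem.Chars.find ([] : List Char) [';']).toNat []) :=
      (PySem.Chars.find_spec hi0).1
    simp at this
  have hk : (PySem.Chars.find s [';']).toNat ≤ s.length := by
    have := PySem.Chars.find_le_length s [';']; omega
  have hcast : PySem.Chars.find s [';'] = ((PySem.Chars.find s [';']).toNat : Int) := by omega
  rw [hcast] at hj
  rw [PySem.Chars.findFrom_natCast s ['/'] _ hk] at hj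
  have hj0 : 0 ≤ j := by
    by_cases hc : PySem.Chars.find (List.drop (PySem.Chars.find s [';']).toNat s) ['/'] = -1
    · simp [hc] at hj; omega
    · simp [hc] at hj
      have := PySem.Chars.neg_one_le_find (List.drop (PySem.Chars.find s [';']).toNat s) ['/']
      omega
  rw [PySem.Chars.slice_eq_listSlice, PySem.List.slice_from _ (by omega : (0:Int) ≤ j + 1)]
  have hpos : 0 < s.length := List.length_pos_iff.mpr hne
  simp [List.length_drop]
  omega

-- the while-loop of Source B: s is the remaining string, out the accumulated kept pieces
def pvBGo (s : List Char) (out : List (List Char)) : List Char :=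
  let i := PySem.Chars.find s [';']
  if hi : i = -1 then PySem.Chars.join [] (out ++ [s])
  else
    let j := PySem.Chars.findFrom s ['/'] i
    if hj : j = -1 then PySem.Chars.join [] (out ++ [PySem.Chars.slice s none (some i)])
    else pvBGo (PySem.Chars.slice s (some (j + 1)) none) (out ++ [PySem.Chars.slice s none (some i)])
termination_by s.length
decreasing_by exact pvSliceLt s _ hi rfl hj

def remove_semicolon_content_alt (requestUri : String) : String :=
  String.ofList (pvBGo requestUri.toList [])

-- ===== PRECONDITION & SPEC =====
def Spec_remove_semicolon_content (requestUri : String) (out : String) : Prop := out = remove_semicolon_content_alt requestUri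
instance (requestUri : String) (out : String) : Decidable (Spec_remove_semicolon_content requestUri out) := by unfold Spec_remove_semicolon_content; infer_instance

-- ===== CLAIM (what is proved, stated in full; the proofs are below) =====
def Claim_equal_remove_semicolon_content : Prop := ∀ (requestUri : String), Dom_remove_semicolon_content requestUri → Spec_remove_semicolon_content requestUri (remove_semicolon_content requestUri)

-- ===== LEMMAS AND PROOFS =====

-- reference function: pvKeep = the scan in "copy" mode, pvSkip = in "dropping" mode
mutual
def pvKeep : List Char → List Char
  | [] => []
  | c :: r => if c = ';' then pvSkip r else c :: pvKeep r
def pvSkip : List Char → List Char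
  | [] => []
  | c :: r => if c = '/' then pvKeep r else pvSkip r
end

theorem pvFoldA (cs : List Char) : ∀ (res : List Char) (st : Bool),
    (cs.foldl pvStepA (res, st)).1 = res ++ (if st then pvSkip cs else pvKeep cs) := by
  induction cs with
  | nil => intro res st; cases st <;> simp [pvKeep, pvSkip]
  | cons c r ih =>
    intro res st
    by_cases hc : c = ';'
    · subst hc
      have h1 : (';' : Char) ≠ '/' := by decide
      cases st <;> simp [pvStepA, pvKeep, pvSkip, ih, h1, List.foldl_cons]
    · by_cases hd : c = '/'
      · subst hd
        cases st <;> simp [pvStepA, pvKeep, pvSkip, ih, hc, List.foldl_cons]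
      · cases st <;> simp [pvStepA, pvKeep, pvSkip, hc, hd, ih, List.foldl_cons]

theorem pvJoinNil (l : List (List Char)) : PySem.Chars.join [] l = l.flatten := by
  induction l with
  | nil => simp [PySem.Chars.join, List.intercalate]
  | cons h t ih =>
    cases t with
    | nil => simp [PySem.Chars.join, List.intercalate]
    | cons h2 t2 =>
      simp [PySem.Chars.join, List.intercalate, List.intersperse] at *
      simpa using ih

theorem pvKeepNoSemi (cs : List Char) (h : ';' ∉ cs) : pvKeep cs = cs := by
  induction cs with
  | nil => simp [pvKeep]
  | cons c r ih =>
    simp at h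
    have hc : c ≠ ';' := fun he => h.1 he.symm
    simp [pvKeep, hc, ih h.2]

theorem pvSkipNoSlash (cs : List Char) (h : '/' ∉ cs) : pvSkip cs = [] := by
  induction cs with
  | nil => simp [pvSkip]
  | cons c r ih =>
    simp at h
    have hc : c ≠ '/' := fun he => h.1 he.symm
    simp [pvSkip, hc, ih h.2]

theorem pvKeepSplit (pre rest : List Char) (h : ';' ∉ pre) :
    pvKeep (pre ++ ';' :: rest) = pre ++ pvSkip rest := by
  induction pre with
  | nil => simp [pvKeep]
  | cons c r ih =>
    simp at h
    have hc : c ≠ ';' := fun he => h.1 he.symm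
    simp [pvKeep, hc, ih h.2]

theorem pvSkipSplit (mid rest : List Char) (h : '/' ∉ mid) :
    pvSkip (mid ++ '/' :: rest) = pvKeep rest := by
  induction mid with
  | nil => simp [pvSkip]
  | cons c r ih =>
    simp at h
    have hc : c ≠ '/' := fun he => h.1 he.symm
    simp [pvSkip, hc, ih h.2]

-- first occurrence of a single character: the string decomposes around `find`
theorem pvFindDecomp (s : List Char) (c : Char) (h : 0 ≤ PySem.Chars.find s [c]) :
    List.drop (PySem.Chars.find s [c]).toNat s
      = c :: List.drop ((PySem.Chars.find s [c]).toNat + 1) s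
    ∧ c ∉ s.take (PySem.Chars.find s [c]).toNat := by
  obtain ⟨hpre, hmin⟩ := PySem.Chars.find_spec h
  set n := (PySem.Chars.find s [c]).toNat with hn
  obtain ⟨t, ht⟩ := hpre
  have hlen : n < s.length := by
    by_contra hc
    push_neg at hc
    rw [List.drop_eq_nil_of_le hc] at ht
    simp at ht
  constructor
  · have ht' : List.drop n s = c :: t := by rw [← ht]; rfl
    have ht2 : List.drop (n + 1) s = t := by rw [← List.tail_drop, ht']; rfl
    rw [ht', ht2]
  · intro hc
    obtain ⟨k, hk, hget⟩ := List.mem_iff_getElem.mp hc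
    have hk' : k < n := by
      have := List.length_take_le n s; omega
    apply hmin k hk'
    have hkl : k < s.length := by omega
    have hck : s[k] = c := by rw [← hget, List.getElem_take]
    exact ⟨s.drop (k + 1), by rw [List.drop_eq_getElem_cons hkl, hck]; rfl⟩

theorem pvBGoEq (s : List Char) (out : List (List Char)) :
    pvBGo s out = out.flatten ++ pvKeep s := by
  suffices H : ∀ N (s : List Char), s.length ≤ N → ∀ out, pvBGo s out = out.flatten ++ pvKeep s by
    exact H s.length s le_rfl out
  intro N
  induction N with
  | zero =>
    intro s hs out
    have h0 : s = [] := List.length_eq_zero_iff.mp (by omega)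
    subst h0
    rw [pvBGo]
    have hf : PySem.Chars.find ([] : List Char) [';'] = -1 := by decide
    simp [hf, pvJoinNil, pvKeep]
  | succ N ih =>
    intro s hs out
    rw [pvBGo]
    by_cases hi : PySem.Chars.find s [';'] = -1
    · have hsemi : ';' ∉ s := by
        intro hm
        exact (PySem.Chars.find_eq_neg_one_iff s [';']).mp hi ((List.singleton_infix_iff ';' s).mpr hm)
      simp [hi, pvJoinNil, pvKeepNoSemi s hsemi]
    · have hi0 : 0 ≤ PySem.Chars.find s [';'] := by
        have := PySem.Chars.neg_one_le_find s [';']; omega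
      set n := (PySem.Chars.find s [';']).toNat with hnn
      obtain ⟨hdrop, hpre⟩ := pvFindDecomp s ';' hi0
      have hk : n ≤ s.length := by
        have := PySem.Chars.find_le_length s [';']; omega
      have hcast : PySem.Chars.find s [';'] = (n : Int) := by omega
      have hkeep : pvKeep s = s.take n ++ pvSkip (s.drop (n + 1)) := by
        conv_lhs => rw [← List.take_append_drop n s, hdrop]
        exact pvKeepSplit _ _ hpre
      rw [hcast, PySem.Chars.findFrom_natCast s ['/'] n hk,
          dif_neg (show ¬((n : Int) = -1) by omega)]
      by_cases hf : PySem.Chars.find (s.drop n) ['/'] = -1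
      · have hslash : '/' ∉ s.drop (n + 1) := by
          intro hm
          apply (PySem.Chars.find_eq_neg_one_iff (s.drop n) ['/']).mp hf
          apply (List.singleton_infix_iff '/' (s.drop n)).mpr
          rw [hdrop]
          exact List.mem_cons_of_mem _ hm
        rw [if_pos hf, dif_pos rfl]
        rw [PySem.Chars.slice_eq_listSlice, PySem.List.slice_to _ (by omega : (0:Int) ≤ (n:Int))]
        rw [pvJoinNil, hkeep, pvSkipNoSlash _ hslash]
        simp
      · have hf0 : 0 ≤ PySem.Chars.find (s.drop n) ['/'] := by
          have := PySem.Chars.neg_one_le_find (s.drop n) ['/']; omega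
        obtain ⟨hdrop2, hpre2⟩ := pvFindDecomp (s.drop n) '/' hf0
        set f := (PySem.Chars.find (s.drop n) ['/']).toNat with hff
        have hfcast : PySem.Chars.find (s.drop n) ['/'] = (f : Int) := by omega
        have hf1 : 1 ≤ f := by
          rcases Nat.eq_zero_or_pos f with h0 | h1
          · exfalso
            rw [h0, List.drop_zero, hdrop] at hdrop2
            exact absurd (List.head_eq_of_cons_eq hdrop2) (by decide)
          · exact h1
        have hcond : ¬ ((n : Int) + PySem.Chars.find (s.drop n) ['/'] = -1) := by omega
        rw [if_neg hf, dif_neg hcond]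
        -- the recursive call works on s[j+1:] = s.drop (n + f + 1)
        have hslice : PySem.Chars.slice s (some ((n : Int) + PySem.Chars.find (s.drop n) ['/'] + 1)) none
            = s.drop (n + f + 1) := by
          have ht : ((n : Int) + (f : Int) + 1).toNat = n + f + 1 := by omega
          rw [hfcast, PySem.Chars.slice_eq_listSlice,
              PySem.List.slice_from _ (by omega : (0:Int) ≤ (n:Int) + (f:Int) + 1), ht]
        have hlen2 : (s.drop (n + f + 1)).length ≤ N := by
          have hpos : 0 < s.length := by
            by_contra hp
            push_neg at hp
            have : s = [] := List.length_eq_zero_iff.mp (by omega)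
            subst this
            simp at hdrop
          simp [List.length_drop]; omega
        rw [hslice, ih _ hlen2]
        -- identify both sides
        have hmid : s.drop (n + 1) = (s.drop (n + 1)).take (f - 1) ++ '/' :: s.drop (n + f + 1) := by
          have h1 : (s.drop (n+1)).drop (f - 1) = '/' :: s.drop (n + f + 1) := by
            have k1 : n + 1 + (f - 1) = n + f := by omega
            have e1 : (s.drop (n+1)).drop (f - 1) = s.drop (n + f) := by
              rw [List.drop_drop, k1]
            have e2 : (s.drop n).drop f = s.drop (n + f) := by
              rw [List.drop_drop]
            have e3 : (s.drop n).drop (f + 1) = s.drop (n + f + 1) := by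
              rw [List.drop_drop, Nat.add_assoc]
            rw [e1, ← e2, hdrop2, e3]
          conv_lhs => rw [← List.take_append_drop (f - 1) (s.drop (n+1)), h1]
        have hmidslash : '/' ∉ (s.drop (n + 1)).take (f - 1) := by
          intro hm
          apply hpre2
          have : (s.drop n).take f = ';' :: (s.drop (n+1)).take (f - 1) := by
            have hf' : f = (f - 1) + 1 := by omega
            rw [hdrop]
            conv_lhs => rw [hf']
            rw [List.take_succ_cons]
          rw [this]
          exact List.mem_cons_of_mem _ hm
        rw [hkeep]
        conv_rhs => rw [hmid, pvSkipSplit _ _ hmidslash]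
        rw [PySem.Chars.slice_eq_listSlice, PySem.List.slice_to _ (by omega : (0:Int) ≤ (n:Int))]
        simp

-- ===== VERDICT (by name: the statement is the Claim_ definition above) =====
theorem remove_semicolon_content_spec : Claim_equal_remove_semicolon_content := by
  intro requestUri _
  unfold Spec_remove_semicolon_content remove_semicolon_content remove_semicolon_content_alt
  rw [pvBGoEq]
  by_cases h : requestUri.toList = []
  · simp [h, pvKeep]
  · simp [h, pvFoldA]
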